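-- pv_equiv track=rewrite | github.com/tomek19991999/One-Vs-All | One_Vs_All.py | take_one_vs_all_sets
-- ===== SOURCE A (Python) =====
-- import copy
--
-- def take_one_vs_all_sets(training_data_all):
--     data_setosa=copy.deepcopy(training_data_all) #Setosa_vs_all
--     data_versicolor=copy.deepcopy(training_data_all)#versicolor_vs_all
--     data_virginica=copy.deepcopy(training_data_all)#Virginica_vs_all
--     length=len(training_data_all)
--     for i in range(len(data_setosa)):
--         if i < len(data_setosa) / 3:
--             data_setosa[i][4] = 1
--             data_versicolor[i][4]=0
--             data_virginica[i][4]=0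
--         elif i < len(data_setosa) * 2 / 3:
--             data_setosa[i][4] = 0
--             data_versicolor[i][4]=1
--             data_virginica[i][4]=0
--         else:
--             data_setosa[i][4] = 0
--             data_versicolor[i][4]=0
--             data_virginica[i][4]=1
--     return data_setosa,data_versicolor,data_virginica
-- ===== SOURCE B (Python) =====
-- def take_one_vs_all_sets(training_data_all):
--     n = len(training_data_all)
--     # closed-form boundaries of the thirds: i < n/3  <=>  i < (n+2)//3, etc.
--     b1 = (n + 2) // 3
--     b2 = (2 * n + 2) // 3
--     head = training_data_all[:b1]
--     mid = training_data_all[b1:b2]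
--     tail = training_data_all[b2:]
--
--     def lab(rows, flag):
--         out = []
--         for r in rows:
--             r2 = list(r)
--             r2[4] = flag
--             out.append(r2)
--         return out
--
--     data_setosa = lab(head, 1) + lab(mid, 0) + lab(tail, 0)
--     data_versicolor = lab(head, 0) + lab(mid, 1) + lab(tail, 0)
--     data_virginica = lab(head, 0) + lab(mid, 0) + lab(tail, 1)
--     return data_setosa, data_versicolor, data_virginica
-- ===== Notes on version B (the rewrite author's own statement) =====
-- stated objective: alternative
-- what changed: B replaces A's triple deepcopy with an in-place index loop and a fused three-way branch by a closed-form computation of the two third-boundaries, slicing the input into three contiguous chunks, and rebuilding each output dataset as a concatenation of relabeled chunk copies (r[:4]+[flag]+r[5:]).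
import Mathlib
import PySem

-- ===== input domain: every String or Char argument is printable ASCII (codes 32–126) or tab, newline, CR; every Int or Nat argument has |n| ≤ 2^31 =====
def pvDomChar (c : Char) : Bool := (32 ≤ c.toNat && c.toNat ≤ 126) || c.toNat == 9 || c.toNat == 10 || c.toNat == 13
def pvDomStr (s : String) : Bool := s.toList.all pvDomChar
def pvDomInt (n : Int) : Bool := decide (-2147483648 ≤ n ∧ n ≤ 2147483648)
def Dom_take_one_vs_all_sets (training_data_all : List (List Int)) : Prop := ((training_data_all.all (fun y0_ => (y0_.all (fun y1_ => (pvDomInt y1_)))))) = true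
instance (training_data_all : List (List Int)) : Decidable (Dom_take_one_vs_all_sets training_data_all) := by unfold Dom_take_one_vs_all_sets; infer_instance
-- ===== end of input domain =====

-- B replaces A's triple deepcopy + fused in-place labeling loop by closed-form third
-- boundaries, slicing into three chunks, and concatenating relabeled chunk copies.

-- ===== PORT A =====
-- Python's float comparisons `i < len(d)/3` and `i < len(d)*2/3` are exact on the
-- domain (the length is far below 2^53, so no rounding can flip them) and equivalent
-- to 3*i < len resp. 3*i < 2*len over the integers; ported as such.
-- `d[i][4] = v` with 0 ≤ i < len d and (under Pre_) 5 ≤ row length is exactly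
-- List.modify i (·.set 4 v).
def take_one_vs_all_sets (training_data_all : List (List Int)) : List (List Int) × List (List Int) × List (List Int) :=
  let data_setosa := training_data_all
  let data_versicolor := training_data_all
  let data_virginica := training_data_all
  (List.range data_setosa.length).foldl
    (fun (st : List (List Int) × List (List Int) × List (List Int)) (i : Nat) =>
      let a := st.1
      let b := st.2.1
      let c := st.2.2
      if 3 * (i : Int) < (a.length : Int) then
        (a.modify i (fun r => r.set 4 1), b.modify i (fun r => r.set 4 0), c.modify i (fun r => r.set 4 0))
      else if 3 * (i : Int) < 2 * (a.length : Int) then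
        (a.modify i (fun r => r.set 4 0), b.modify i (fun r => r.set 4 1), c.modify i (fun r => r.set 4 0))
      else
        (a.modify i (fun r => r.set 4 0), b.modify i (fun r => r.set 4 0), c.modify i (fun r => r.set 4 1)))
    (data_setosa, data_versicolor, data_virginica)

-- ===== PORT B =====
-- relabeled copies of a chunk: Python `r2 = list(r); r2[4] = flag` per row
-- (`r2[4] = flag` with, under Pre_, 5 ≤ len r is exactly List.set 4 flag)
def pvLab (rows : List (List Int)) (flag : Int) : List (List Int) :=
  rows.map (fun r => r.set 4 flag)

def take_one_vs_all_sets_alt (training_data_all : List (List Int)) : List (List Int) × List (List Int) × List (List Int) :=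
  let n := training_data_all.length
  -- Python `(n+2)//3` and `(2*n+2)//3` on the nonnegative n = len: Nat division is exact here
  let b1 := (n + 2) / 3
  let b2 := (2 * n + 2) / 3
  -- t[:b1], t[b1:b2], t[b2:] with 0 ≤ b1 ≤ b2
  let head := training_data_all.take b1
  let mid := (training_data_all.drop b1).take (b2 - b1)
  let tail := training_data_all.drop b2
  (pvLab head 1 ++ pvLab mid 0 ++ pvLab tail 0,
   pvLab head 0 ++ pvLab mid 1 ++ pvLab tail 0,
   pvLab head 0 ++ pvLab mid 0 ++ pvLab tail 1)

-- ===== PRECONDITION & SPEC =====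
-- Pre_ excludes exactly the inputs on which Python A raises: a row shorter than 5
-- makes `row[4] = …` raise IndexError.
def Pre_take_one_vs_all_sets (training_data_all : List (List Int)) : Prop :=
  ∀ row ∈ training_data_all, 5 ≤ row.length
instance (training_data_all : List (List Int)) : Decidable (Pre_take_one_vs_all_sets training_data_all) := by unfold Pre_take_one_vs_all_sets; infer_instance
def pvWitness_take_one_vs_all_sets : List (List Int) := [[1, 2, 3, 4, 0], [5, 6, 7, 8, 1], [0, 0, 0, 0, 2]]

def Spec_take_one_vs_all_sets (training_data_all : List (List Int)) (out : List (List Int) × List (List Int) × List (List Int)) : Prop := out = take_one_vs_all_sets_alt training_data_all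
instance (training_data_all : List (List Int)) (out : List (List Int) × List (List Int) × List (List Int)) : Decidable (Spec_take_one_vs_all_sets training_data_all out) := by unfold Spec_take_one_vs_all_sets; infer_instance

-- ===== CLAIM (what is proved, stated in full; the proofs are below) =====
def Claim_equal_take_one_vs_all_sets : Prop := ∀ (training_data_all : List (List Int)), Dom_take_one_vs_all_sets training_data_all → Pre_take_one_vs_all_sets training_data_all → Spec_take_one_vs_all_sets training_data_all (take_one_vs_all_sets training_data_all)

-- ===== LEMMAS AND PROOFS =====

-- one in-place labeling pass, abstracted over the value written at index 4 of row i
def pvStepOne (v : Nat → Int) (d : List (List Int)) (i : Nat) : List (List Int) :=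
  d.modify i (fun r => r.set 4 (v i))

def pvValA (n : Int) (k : Nat) (i : Nat) : Int :=
  if 3 * (i : Int) < n then (if k = 0 then 1 else 0)
  else if 3 * (i : Int) < 2 * n then (if k = 1 then 1 else 0)
  else (if k = 2 then 1 else 0)

-- A's fused fold splits into three independent labeling passes
lemma pvFoldSplit (l : List Nat) (n : Int) (a b c : List (List Int))
    (ha : (a.length : Int) = n) :
    l.foldl
      (fun (st : List (List Int) × List (List Int) × List (List Int)) (i : Nat) =>
        if 3 * (i : Int) < (st.1.length : Int) then
          (st.1.modify i (fun r => r.set 4 1), st.2.1.modify i (fun r => r.set 4 0), st.2.2.modify i (fun r => r.set 4 0))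
        else if 3 * (i : Int) < 2 * (st.1.length : Int) then
          (st.1.modify i (fun r => r.set 4 0), st.2.1.modify i (fun r => r.set 4 1), st.2.2.modify i (fun r => r.set 4 0))
        else
          (st.1.modify i (fun r => r.set 4 0), st.2.1.modify i (fun r => r.set 4 0), st.2.2.modify i (fun r => r.set 4 1)))
      (a, b, c)
    = (l.foldl (pvStepOne (pvValA n 0)) a, l.foldl (pvStepOne (pvValA n 1)) b,
       l.foldl (pvStepOne (pvValA n 2)) c) := by
  induction l generalizing a b c with
  | nil => rfl
  | cons i l ih =>
    simp only [List.foldl_cons, ha]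
    have hlen : ∀ (f : List Int → List Int), (((a.modify i f).length : Nat) : Int) = n := by
      intro f; simp [ha]
    by_cases h1 : 3 * (i : Int) < n
    · rw [if_pos h1, ih _ _ _ (hlen _)]
      simp [pvStepOne, pvValA, h1]
    · rw [if_neg h1]
      by_cases h2 : 3 * (i : Int) < 2 * n
      · rw [if_pos h2, ih _ _ _ (hlen _)]
        simp [pvStepOne, pvValA, h1, h2]
      · rw [if_neg h2, ih _ _ _ (hlen _)]
        simp [pvStepOne, pvValA, h1, h2]

-- a labeling pass over range n is a bounded mapIdx
lemma pvFoldRange (v : Nat → Int) (n : Nat) (d : List (List Int)) :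
    (List.range n).foldl (pvStepOne v) d
    = d.mapIdx (fun i r => if i < n then r.set 4 (v i) else r) := by
  induction n with
  | zero =>
    symm
    apply List.ext_getElem (by simp)
    intro i h1 h2
    simp
  | succ n ih =>
    rw [List.range_succ, List.foldl_append, ih]
    simp only [List.foldl_cons, List.foldl_nil, pvStepOne]
    apply List.ext_getElem
    · simp
    · intro i h1 h2
      simp only [List.getElem_modify, List.getElem_mapIdx]
      rcases Nat.lt_trichotomy i n with h | h | h
      · simp [Nat.ne_of_gt h, h, Nat.lt_succ_of_lt h]
      · subst h
        simp
      · simp [Nat.ne_of_lt h, Nat.not_lt.2 (Nat.le_of_lt h), Nat.not_lt.2 (Nat.succ_le_of_lt h)]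

-- each of A's labeling passes equals B's chunked concatenation
lemma pvSegComponent (t : List (List Int)) (k : Nat) :
    t.mapIdx (fun i r => if i < t.length then r.set 4 (pvValA (t.length : Int) k i) else r)
    = pvLab (t.take ((t.length + 2) / 3)) (if k = 0 then 1 else 0)
      ++ pvLab ((t.drop ((t.length + 2) / 3)).take ((2 * t.length + 2) / 3 - (t.length + 2) / 3)) (if k = 1 then 1 else 0)
      ++ pvLab (t.drop ((2 * t.length + 2) / 3)) (if k = 2 then 1 else 0) := by
  set n := t.length with hn
  apply List.ext_getElem
  · simp [pvLab, ← hn]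
    omega
  · intro i h1 h2
    have hi : i < n := by simpa [← hn] using h1
    simp only [List.getElem_mapIdx, hi, if_pos]
    by_cases c1 : i < (n + 2) / 3
    · rw [List.getElem_append_left (by simp [pvLab, ← hn]; omega),
        List.getElem_append_left (by simp [pvLab, ← hn]; omega)]
      have hv : pvValA (n : Int) k i = (if k = 0 then 1 else 0) := by
        unfold pvValA; have : 3 * (i : Int) < (n : Int) := by omega
        simp [this]
      simp only [pvLab, List.getElem_map, List.getElem_take]
      rw [hv]
    · by_cases c2 : i < (2 * n + 2) / 3
      · rw [List.getElem_append_left (by simp [pvLab, ← hn]; omega),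
          List.getElem_append_right (by simp [pvLab, ← hn]; omega)]
        have hv : pvValA (n : Int) k i = (if k = 1 then 1 else 0) := by
          unfold pvValA
          have e1 : ¬ (3 * (i : Int) < (n : Int)) := by omega
          have e2 : 3 * (i : Int) < 2 * (n : Int) := by omega
          simp [e1, e2]
        simp only [pvLab, List.getElem_map, List.getElem_take, List.getElem_drop, List.length_map,
          List.length_take, ← hn]
        rw [hv]
        have hidx : (n + 2) / 3 + (i - min ((n + 2) / 3) n) = i := by omega
        simp [hidx]
      · rw [List.getElem_append_right (by simp [pvLab, ← hn]; omega)]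
        have hv : pvValA (n : Int) k i = (if k = 2 then 1 else 0) := by
          unfold pvValA
          have e1 : ¬ (3 * (i : Int) < (n : Int)) := by omega
          have e2 : ¬ (3 * (i : Int) < 2 * (n : Int)) := by omega
          simp [e1, e2]
        simp only [pvLab, List.getElem_map, List.getElem_drop, List.length_append, List.length_map,
          List.length_take, List.length_drop, ← hn]
        rw [hv]
        have hidx : (2 * n + 2) / 3 + (i - (min ((n + 2) / 3) n + min ((2 * n + 2) / 3 - (n + 2) / 3) (n - (n + 2) / 3))) = i := by omega
        simp [hidx]

-- ===== VERDICT (by name: the statement is the Claim_ definition above) =====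
theorem take_one_vs_all_sets_spec : Claim_equal_take_one_vs_all_sets := by
  intro t _ _
  show take_one_vs_all_sets t = take_one_vs_all_sets_alt t
  simp only [take_one_vs_all_sets, take_one_vs_all_sets_alt]
  rw [pvFoldSplit (List.range t.length) (t.length : Int) t t t rfl]
  simp only [pvFoldRange]
  refine Prod.ext ?_ (Prod.ext ?_ ?_)
  · simpa using pvSegComponent t 0
  · simpa using pvSegComponent t 1
  · simpa using pvSegComponent t 2
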